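-- pv_equiv track=rewrite | github.com/reactorlabs/testr | fastr.py | vectorSkipWhitespaceDecoder
-- ===== SOURCE A (Python) =====
-- def vectorSkipWhitespaceDecoder(output):
-- 	""" Given the output, it transforms it to a single vector of all values contained in it separated by space and no other whitespace characters anywhere between them. """
-- 	result = ""
-- 	lastWhitespace = False
-- 	insideBrackets = False
-- 	for c in output:
-- 		if (c == '['):
-- 			insideBrackets = True
-- 			continue
-- 		if (insideBrackets):
-- 			if (c == ']'):
-- 				insideBrackets = False
-- 			continue
-- 		if (c in (' ','\n', '\t')):
-- 			if (not lastWhitespace):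
-- 				result += " "
-- 				lastWhitespace = True
-- 		else:
-- 			lastWhitespace = False
-- 			result += str(c)
-- 	return result.strip()
-- ===== SOURCE B (Python) =====
-- def vectorSkipWhitespaceDecoder(output):
-- 	""" Two sequential passes: first delete bracketed regions, then collapse runs of ' '/'\t'/'\n' to single spaces and strip. """
-- 	# pass 1: remove bracketed regions ('[' up to and including the next ']'; unmatched '[' eats to the end)
-- 	kept = []
-- 	i = 0
-- 	n = len(output)
-- 	while i < n:
-- 		c = output[i]
-- 		if c == '[':
-- 			j = output.find(']', i + 1)
-- 			i = n if j == -1 else j + 1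
-- 		else:
-- 			kept.append(c)
-- 			i += 1
-- 	# pass 2: collapse every run of ' ', '\t', '\n' into one space
-- 	out = []
-- 	for c in kept:
-- 		if c in ' \t\n':
-- 			if out and out[-1] != ' ':
-- 				out.append(' ')
-- 		else:
-- 			out.append(c)
-- 	return ''.join(out).strip()
-- ===== Notes on version B (the rewrite author's own statement) =====
-- stated objective: simpler
-- what changed: Replaces A's single fused scan with interacting insideBrackets/lastWhitespace flags by two independent sequential passes: first delete every bracketed region (each opening bracket jumps past the next closing one via find, an unmatched one eats to the end), then collapse each run of space/tab/newline to one space by looking at the last emitted character, and strip.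
import Mathlib
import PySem

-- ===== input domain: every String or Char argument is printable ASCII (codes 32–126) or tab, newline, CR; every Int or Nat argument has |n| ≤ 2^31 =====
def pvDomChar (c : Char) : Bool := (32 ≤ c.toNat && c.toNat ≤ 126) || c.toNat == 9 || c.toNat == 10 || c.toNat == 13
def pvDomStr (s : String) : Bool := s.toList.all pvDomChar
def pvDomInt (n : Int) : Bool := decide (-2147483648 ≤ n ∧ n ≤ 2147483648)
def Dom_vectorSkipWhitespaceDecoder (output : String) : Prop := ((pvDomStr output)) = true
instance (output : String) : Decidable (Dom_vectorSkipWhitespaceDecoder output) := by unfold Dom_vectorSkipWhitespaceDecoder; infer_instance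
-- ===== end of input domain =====

-- B replaces A's fused three-flag state machine by two sequential passes (delete bracketed
-- regions, then collapse whitespace runs against the last emitted char); objective: simpler.

-- ===== PORT A =====
-- state = (result, lastWhitespace, insideBrackets), one fused fold over the characters
def pvStepA (st : List Char × Bool × Bool) (c : Char) : List Char × Bool × Bool :=
  if c = '[' then (st.1, st.2.1, true)
  else if st.2.2 then (st.1, st.2.1, if c = ']' then false else st.2.2)
  else if c = ' ' ∨ c = '\n' ∨ c = '\t' then
    (if st.2.1 then st else (st.1 ++ [' '], true, st.2.2))
  else (st.1 ++ [c], false, st.2.2)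

def vectorSkipWhitespaceDecoder (output : String) : String :=
  String.ofList (PySem.Chars.strip (output.toList.foldl pvStepA ([], false, false)).1)

-- ===== PORT B =====
-- pass 1 helper: Python's `j = output.find(']', i+1); i = n if j == -1 else j+1` jump,
-- exact as a structural skip to just past the next ']' (to the end if there is none)
def pvDropToClose : List Char → List Char
  | [] => []
  | c :: rest => if c = ']' then rest else pvDropToClose rest

theorem pvDropToClose_length_le (l : List Char) : (pvDropToClose l).length ≤ l.length := by
  induction l with
  | nil => simp [pvDropToClose]
  | cons c rest ih =>
    simp only [pvDropToClose]
    split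
    · simp
    · simp only [List.length_cons]; omega

-- pass 1: the while-loop removing bracketed regions
def pvRemoveBrackets : List Char → List Char
  | [] => []
  | c :: rest =>
      if c = '[' then pvRemoveBrackets (pvDropToClose rest)
      else c :: pvRemoveBrackets rest
  termination_by l => l.length
  decreasing_by
  · exact Nat.lt_succ_of_le (pvDropToClose_length_le rest)
  · simp

-- pass 2: collapse a whitespace run to one space, checking the last emitted char (out[-1])
def pvCollapse (acc : List Char) (c : Char) : List Char :=
  if c = ' ' ∨ c = '\t' ∨ c = '\n' then
    (if acc ≠ [] ∧ PySem.List.pyGet? acc (-1) ≠ some ' ' then acc ++ [' '] else acc)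
  else acc ++ [c]

def vectorSkipWhitespaceDecoder_alt (output : String) : String :=
  String.ofList (PySem.Chars.strip ((pvRemoveBrackets output.toList).foldl pvCollapse []))

-- ===== PRECONDITION & SPEC =====
def Spec_vectorSkipWhitespaceDecoder (output : String) (out : String) : Prop := out = vectorSkipWhitespaceDecoder_alt output
instance (output : String) (out : String) : Decidable (Spec_vectorSkipWhitespaceDecoder output out) := by unfold Spec_vectorSkipWhitespaceDecoder; infer_instance

-- ===== CLAIM (what is proved, stated in full; the proofs are below) =====
def Claim_equal_vectorSkipWhitespaceDecoder : Prop := ∀ (output : String), Dom_vectorSkipWhitespaceDecoder output → Spec_vectorSkipWhitespaceDecoder output (vectorSkipWhitespaceDecoder output)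

-- ===== LEMMAS AND PROOFS =====

-- the whitespace-only machine A runs while not inside brackets (proof device)
def pvW (st : List Char × Bool) (c : Char) : List Char × Bool :=
  if c = ' ' ∨ c = '\n' ∨ c = '\t' then (if st.2 then st else (st.1 ++ [' '], true))
  else (st.1 ++ [c], false)

-- the observable part of A's state (result, lastWhitespace); insideBrackets is scaffolding
def pvProj (st : List Char × Bool × Bool) : List Char × Bool := (st.1, st.2.1)

-- skipping inside brackets: A with insideBrackets = true just drops up to the next ']'
theorem pvStepA_skip (l : List Char) (res : List Char) (lw : Bool) :
    pvProj (l.foldl pvStepA (res, lw, true)) =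
      pvProj ((pvDropToClose l).foldl pvStepA (res, lw, false)) := by
  induction l generalizing res lw with
  | nil => simp [pvDropToClose, pvProj]
  | cons c rest ih =>
    by_cases h : c = ']'
    · subst h; simp [pvStepA, pvDropToClose]
    · by_cases hb : c = '['
      · subst hb; simp [pvStepA, pvDropToClose, ih]
      · simp [pvStepA, pvDropToClose, h, hb, ih]

-- fusing A's bracket handling: outside brackets A is pvW run on the bracket-stripped input
theorem pvStepA_fuse (l : List Char) (res : List Char) (lw : Bool) :
    pvProj (l.foldl pvStepA (res, lw, false)) = (pvRemoveBrackets l).foldl pvW (res, lw) := by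
  induction l using pvRemoveBrackets.induct generalizing res lw
  case case1 => simp [pvProj, pvRemoveBrackets]
  case case2 rest ih =>
    simp only [List.foldl_cons, pvStepA, pvRemoveBrackets, reduceIte]
    rw [pvStepA_skip]
    exact ih res lw
  case case3 c rest hb ih =>
    simp only [List.foldl_cons, pvRemoveBrackets, if_neg hb]
    by_cases hw : c = ' ' ∨ c = '\n' ∨ c = '\t'
    · cases lw
      · rw [show pvStepA (res, false, false) c = (res ++ [' '], true, false) from by
          simp [pvStepA, hb, hw]]
        rw [show pvW (res, false) c = (res ++ [' '], true) from by simp [pvW, hw]]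
        exact ih (res ++ [' ']) true
      · rw [show pvStepA (res, true, false) c = (res, true, false) from by
          simp [pvStepA, hb, hw]]
        rw [show pvW (res, true) c = (res, true) from by simp [pvW, hw]]
        exact ih res true
    · rw [show pvStepA (res, lw, false) c = (res ++ [c], false, false) from by
        simp [pvStepA, hb, hw]]
      rw [show pvW (res, lw) c = (res ++ [c], false) from by simp [pvW, hw]]
      exact ih (res ++ [c]) false

-- invariant linking A's lastWhitespace flag machine to B's look-at-last collapse
theorem pvW_collapse (l : List Char) (res acc : List Char) (lw : Bool)
    (pre : List Char) (hpre : pre = [] ∨ pre = [' '])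
    (hres : res = pre ++ acc)
    (hlw : lw = true ↔ res.getLast? = some ' ') :
    ∃ pre', (pre' = [] ∨ pre' = [' ']) ∧
      (l.foldl pvW (res, lw)).1 = pre' ++ l.foldl pvCollapse acc := by
  induction l generalizing res acc lw pre with
  | nil => exact ⟨pre, hpre, hres⟩
  | cons c rest ih =>
    by_cases hw : c = ' ' ∨ c = '\n' ∨ c = '\t'
    · have hw' : (c = ' ' ∨ c = '\t' ∨ c = '\n') := by tauto
      cases lw with
      | true =>
        -- A skips; B skips too since res (= pre ++ acc) ends in ' '
        have hend : res.getLast? = some ' ' := hlw.mp rfl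
        have hbskip : ¬ (acc ≠ [] ∧ PySem.List.pyGet? acc (-1) ≠ some ' ') := by
          rintro ⟨hne, hlast⟩
          apply hlast
          rw [PySem.List.pyGet?_neg_one]
          rw [hres, List.getLast?_append_of_ne_nil pre hne] at hend
          exact hend
        simp only [List.foldl_cons]
        rw [show pvW (res, true) c = (res, true) from by simp [pvW, hw]]
        rw [show pvCollapse acc c = acc from by simp only [pvCollapse, if_pos hw', if_neg hbskip]]
        exact ih res acc true pre hpre hres hlw
      | false =>
        have hend : ¬ res.getLast? = some ' ' := fun h => by simpa using hlw.mpr h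
        simp only [List.foldl_cons]
        rw [show pvW (res, false) c = (res ++ [' '], true) from by simp [pvW, hw]]
        by_cases hacc : acc = []
        · -- res = pre = []: B skips, the leading space goes into pre'
          have hpe : pre = [] := by
            rcases hpre with h | h
            · exact h
            · exfalso; apply hend; rw [hres, h, hacc]; rfl
          rw [show pvCollapse acc c = acc from by
            simp only [pvCollapse, if_pos hw', hacc]; simp]
          refine ih (res ++ [' ']) acc true [' '] (Or.inr rfl) ?_ ?_
          · rw [hres, hpe, hacc]; rfl
          · simp
        · -- both emit a space
          have hb : (acc ≠ [] ∧ PySem.List.pyGet? acc (-1) ≠ some ' ') := by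
            refine ⟨hacc, ?_⟩
            rw [PySem.List.pyGet?_neg_one]
            intro h
            apply hend
            rw [hres, List.getLast?_append_of_ne_nil pre hacc]
            exact h
          rw [show pvCollapse acc c = acc ++ [' '] from by
            simp only [pvCollapse, if_pos hw', if_pos hb]]
          refine ih (res ++ [' ']) (acc ++ [' ']) true pre hpre ?_ ?_
          · rw [hres, List.append_assoc]
          · simp
    · -- both emit c, which is not ' '
      have hw' : ¬ (c = ' ' ∨ c = '\t' ∨ c = '\n') := by tauto
      have hcs : c ≠ ' ' := fun h => hw (Or.inl h)
      simp only [List.foldl_cons]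
      rw [show pvW (res, lw) c = (res ++ [c], false) from by simp [pvW, hw]]
      rw [show pvCollapse acc c = acc ++ [c] from by simp only [pvCollapse, if_neg hw']]
      refine ih (res ++ [c]) (acc ++ [c]) false pre hpre ?_ ?_
      · rw [hres, List.append_assoc]
      · simp [hcs]

-- a leading space never survives .strip()
theorem strip_space_cons (l : List Char) :
    PySem.Chars.strip (' ' :: l) = PySem.Chars.strip l := by
  have h : PySem.Chars.isspace ' ' = true := by decide
  simp [PySem.Chars.strip, PySem.Chars.lstrip, h]

-- ===== VERDICT (by name: the statement is the Claim_ definition above) =====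
theorem vectorSkipWhitespaceDecoder_spec : Claim_equal_vectorSkipWhitespaceDecoder := by
  intro output _
  unfold Spec_vectorSkipWhitespaceDecoder vectorSkipWhitespaceDecoder vectorSkipWhitespaceDecoder_alt
  have hf := pvStepA_fuse output.toList [] false
  have h1 : (output.toList.foldl pvStepA ([], false, false)).1 =
      ((pvRemoveBrackets output.toList).foldl pvW ([], false)).1 := by
    have := congrArg Prod.fst hf
    simpa [pvProj] using this
  rw [h1]
  obtain ⟨pre', hpre', heq⟩ :=
    pvW_collapse (pvRemoveBrackets output.toList) [] [] false [] (Or.inl rfl) rfl (by simp)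
  rw [heq]
  rcases hpre' with h | h
  · rw [h]; rfl
  · rw [h]
    simp only [List.singleton_append]
    rw [strip_space_cons]
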